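-- pv_equiv track=rewrite | github.com/ShaoTH-C/NN-Ecosystem | visualization/game_renderer.py | _tool_at
-- ===== SOURCE A (Python) =====
-- from typing import List, Tuple, Optional
--
-- TOOLS = [
--     {"id": "food",     "label": "Bring Forth Food",     "hotkey": "1",
--      "subtitle": "Drop a grove of plants",       "color": (130, 220, 110)},
--     {"id": "herb",     "label": "Manifest Herbivore",   "hotkey": "2",
--      "subtitle": "Spawn a peaceful grazer",      "color": (90, 200, 130)},
--     {"id": "carn",     "label": "Manifest Predator",    "hotkey": "3",
--      "subtitle": "Spawn a hungry hunter",        "color": (220, 90, 90)},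
--     {"id": "blessing", "label": "Sun's Blessing",       "hotkey": "4",
--      "subtitle": "Heal all in the light",        "color": (255, 220, 130)},
--     {"id": "rain",     "label": "Summon Rain",          "hotkey": "5",
--      "subtitle": "World-wide food bloom",        "color": (130, 180, 240)},
--     {"id": "disaster", "label": "Strike a Meteor",      "hotkey": "6",
--      "subtitle": "Burn an area to ash",          "color": (255, 130, 60)},
--     {"id": "plague",   "label": "Cast a Plague",        "hotkey": "7",
--      "subtitle": "Slow drain across the land",   "color": (160, 220, 90)},
-- ]
--
-- SIDEBAR_WIDTH = 250
--
-- def _tool_at(pos: Tuple[int, int]) -> Optional[str]: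
--     x, y = pos
--     if x > SIDEBAR_WIDTH:
--         return None
--     # buttons start beneath the title block
--     btn_top = 130
--     btn_h = 62
--     btn_gap = 6
--     for i, tool in enumerate(TOOLS):
--         by = btn_top + i * (btn_h + btn_gap)
--         if 12 <= x <= SIDEBAR_WIDTH - 12 and by <= y <= by + btn_h:
--             return tool["id"]
--     return None
-- ===== SOURCE B (Python) =====
-- from typing import Tuple, Optional
--
-- TOOLS = [
--     {"id": "food"}, {"id": "herb"}, {"id": "carn"}, {"id": "blessing"},
--     {"id": "rain"}, {"id": "disaster"}, {"id": "plague"},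
-- ]
-- TOOL_IDS = ["food", "herb", "carn", "blessing", "rain", "disaster", "plague"]
--
-- SIDEBAR_WIDTH = 250
--
-- def _tool_at(pos: Tuple[int, int]) -> Optional[str]:
--     x, y = pos
--     if not (12 <= x <= SIDEBAR_WIDTH - 12):
--         return None
--     i, offset = divmod(y - 130, 62 + 6)
--     if 0 <= i < len(TOOL_IDS) and offset <= 62:
--         return TOOL_IDS[i]
--     return None
-- ===== Notes on version B (the rewrite author's own statement) =====
-- stated objective: simpler
-- what changed: Replaces the loop over the 7 tool buttons with direct band arithmetic: i, offset = divmod(y-130, 68), returning TOOL_IDS[i] when 0 <= i < 7 and offset <= 62; the redundant early x > SIDEBAR_WIDTH check disappears because the inclusive x-band 12..238 already implies it.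
import Mathlib
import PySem

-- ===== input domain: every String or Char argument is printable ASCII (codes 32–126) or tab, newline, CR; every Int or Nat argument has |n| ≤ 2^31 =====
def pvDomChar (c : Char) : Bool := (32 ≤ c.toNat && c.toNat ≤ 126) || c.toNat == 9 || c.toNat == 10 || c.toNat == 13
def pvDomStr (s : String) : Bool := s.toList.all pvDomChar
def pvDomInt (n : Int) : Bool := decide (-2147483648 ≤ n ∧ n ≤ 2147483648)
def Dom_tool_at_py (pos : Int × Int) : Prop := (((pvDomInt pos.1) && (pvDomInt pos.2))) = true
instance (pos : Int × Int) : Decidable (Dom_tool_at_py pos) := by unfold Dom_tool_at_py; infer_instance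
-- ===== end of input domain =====

-- B replaces A's loop over the 7 buttons by direct band arithmetic (divmod by 68); simpler, same result.

-- only the "id" field of each TOOLS entry is ever used, so TOOLS is modelled by the ids
def toolIds : List String := ["food", "herb", "carn", "blessing", "rain", "disaster", "plague"]

-- ===== PORT A =====
-- the 'for i, tool in enumerate(TOOLS)' loop with early return
def toolAtLoop (x y : Int) : List (Int × String) → Option String
  | [] => none
  | (i, tool) :: rest =>
    let by_ : Int := 130 + i * (62 + 6)
    if 12 ≤ x ∧ x ≤ 250 - 12 ∧ by_ ≤ y ∧ y ≤ by_ + 62 then some tool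
    else toolAtLoop x y rest

def tool_at_py (pos : Int × Int) : Option String :=
  let x := pos.1
  let y := pos.2
  if x > 250 then none
  else toolAtLoop x y (PySem.List.enumerate toolIds)

-- ===== PORT B =====
def tool_at_py_alt (pos : Int × Int) : Option String :=
  let x := pos.1
  let y := pos.2
  if ¬ (12 ≤ x ∧ x ≤ 250 - 12) then none
  else
    let i := PySem.Int.floordiv (y - 130) (62 + 6)
    let offset := PySem.Int.mod (y - 130) (62 + 6)
    if 0 ≤ i ∧ i < (toolIds.length : Int) ∧ offset ≤ 62 then
      PySem.List.pyGet? toolIds i   -- TOOL_IDS[i]; the guard makes it in range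
    else none

-- ===== PRECONDITION & SPEC =====
def Spec_tool_at_py (pos : Int × Int) (out : Option String) : Prop := out = tool_at_py_alt pos
instance (pos : Int × Int) (out : Option String) : Decidable (Spec_tool_at_py pos out) := by unfold Spec_tool_at_py; infer_instance

-- ===== CLAIM (what is proved, stated in full; the proofs are below) =====
def Claim_equal_tool_at_py : Prop := ∀ (pos : Int × Int), Dom_tool_at_py pos → Spec_tool_at_py pos (tool_at_py pos)

-- ===== LEMMAS AND PROOFS =====

theorem tool_at_eq (x y : Int) : tool_at_py (x, y) = tool_at_py_alt (x, y) := by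
  simp only [tool_at_py, tool_at_py_alt, toolAtLoop, toolIds,
    PySem.List.enumerate_cons, PySem.List.enumerate_nil, List.length]
  have hdm := PySem.Int.floordiv_mul_add_mod (y - 130) (62 + 6)
  have h0 : 0 ≤ PySem.Int.mod (y - 130) (62 + 6) := PySem.Int.mod_nonneg _ (by norm_num)
  have h1 : PySem.Int.mod (y - 130) (62 + 6) < 62 + 6 := PySem.Int.mod_lt _ (by norm_num)
  generalize hq : PySem.Int.floordiv (y - 130) (62 + 6) = q at *
  generalize hr : PySem.Int.mod (y - 130) (62 + 6) = r at *
  split_ifs <;>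
    first
      | rfl
      | omega
      | (rw [show q = 0 by omega]; rfl)
      | (rw [show q = 1 by omega]; rfl)
      | (rw [show q = 2 by omega]; rfl)
      | (rw [show q = 3 by omega]; rfl)
      | (rw [show q = 4 by omega]; rfl)
      | (rw [show q = 5 by omega]; rfl)
      | (rw [show q = 6 by omega]; rfl)

-- ===== VERDICT (by name: the statement is the Claim_ definition above) =====
theorem tool_at_py_spec : Claim_equal_tool_at_py := by
  intro pos _
  obtain ⟨x, y⟩ := pos
  unfold Spec_tool_at_py
  exact tool_at_eq x y
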